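-- pv_equiv track=rewrite | github.com/virat-dagar/PatternPrinter | backend/patterns.py | _right_triangle_reverse_hollow
-- ===== SOURCE A (Python) =====
-- def _right_triangle_reverse_hollow(symbol: str, size: int) -> list[str]:
--     rows = []
--     for row in range(size):
--         line = []
--         for col in range(row, size):
--             line.append(symbol if row in (0, size - 1) or col in (row, size - 1) else " ")
--         rows.append("".join(line))
--     return rows
-- ===== SOURCE B (Python) =====
-- def _right_triangle_reverse_hollow(symbol: str, size: int) -> list[str]:
--     rows = []
--     for row in range(size):
--         width = size - row
--         if row == 0 or row == size - 1:
--             rows.append(symbol * width)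
--         else:
--             rows.append(symbol + " " * (width - 2) + symbol)
--     return rows
-- ===== Notes on version B (the rewrite author's own statement) =====
-- stated objective: simpler
-- what changed: Replaces the inner per-column loop with its edge test by a closed-form per-row string: a solid run for the first/last row, otherwise border symbols around a run of spaces.
import Mathlib
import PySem

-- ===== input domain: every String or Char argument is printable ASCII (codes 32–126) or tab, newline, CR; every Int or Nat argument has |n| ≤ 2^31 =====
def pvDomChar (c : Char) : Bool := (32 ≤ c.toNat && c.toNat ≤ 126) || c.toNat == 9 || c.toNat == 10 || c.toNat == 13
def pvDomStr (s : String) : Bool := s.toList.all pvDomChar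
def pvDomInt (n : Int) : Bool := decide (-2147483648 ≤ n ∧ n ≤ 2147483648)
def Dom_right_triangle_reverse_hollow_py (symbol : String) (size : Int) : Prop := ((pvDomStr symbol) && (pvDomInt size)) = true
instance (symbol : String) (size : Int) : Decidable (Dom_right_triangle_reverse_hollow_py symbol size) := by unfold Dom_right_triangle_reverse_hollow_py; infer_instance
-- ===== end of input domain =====

-- B replaces the inner per-column loop and its edge test with a closed-form string per row (simpler decomposition).


-- ===== PORT A =====
def right_triangle_reverse_hollow_py (symbol : String) (size : Int) : List String :=
  (PySem.List.pyRange 0 size 1).foldl (fun rows row =>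
    rows ++ [PySem.Str.join ""
      ((PySem.List.pyRange row size 1).foldl (fun line col =>
        line ++ [if row = 0 ∨ row = size - 1 ∨ col = row ∨ col = size - 1 then symbol else " "]) [])]) []

-- ===== PORT B =====
-- hand port of Python's 's * n' (n ≤ 0 gives ""): exact, concatenation of n copies
def pvStrTimes (s : String) (n : Int) : String := PySem.Str.join "" (List.replicate n.toNat s)

def right_triangle_reverse_hollow_py_alt (symbol : String) (size : Int) : List String :=
  (PySem.List.pyRange 0 size 1).foldl (fun rows row =>
    let width := size - row
    rows ++ [if row = 0 ∨ row = size - 1 then pvStrTimes symbol width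
             else symbol ++ pvStrTimes " " (width - 2) ++ symbol]) []

-- ===== PRECONDITION & SPEC =====
def Spec_right_triangle_reverse_hollow_py (symbol : String) (size : Int) (out : List String) : Prop := out = right_triangle_reverse_hollow_py_alt symbol size
instance (symbol : String) (size : Int) (out : List String) : Decidable (Spec_right_triangle_reverse_hollow_py symbol size out) := by unfold Spec_right_triangle_reverse_hollow_py; infer_instance

-- ===== CLAIM (what is proved, stated in full; the proofs are below) =====
def Claim_equal_right_triangle_reverse_hollow_py : Prop := ∀ (symbol : String) (size : Int), Dom_right_triangle_reverse_hollow_py symbol size → Spec_right_triangle_reverse_hollow_py symbol size (right_triangle_reverse_hollow_py symbol size)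

-- ===== LEMMAS AND PROOFS =====

-- an append-accumulator fold is init ++ map
theorem pv_foldl_app {α β : Type} (f : α → β) : ∀ (l : List α) (init : List β),
    l.foldl (fun acc x => acc ++ [f x]) init = init ++ l.map f := by
  intro l
  induction l with
  | nil => simp
  | cons a t ih => intro init; simp [ih]

theorem pv_join_empty (parts : List (List Char)) : PySem.Chars.join [] parts = parts.flatten := by
  induction parts with
  | nil => rfl
  | cons a t ih =>
    cases t with
    | nil => simp [PySem.Chars.join, List.intercalate, List.intersperse]
    | cons b u =>
      simp only [PySem.Chars.join, List.intercalate, List.intersperse] at *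
      simp_all

theorem pv_join_toList (parts : List String) :
    (PySem.Str.join "" parts).toList = (parts.map String.toList).flatten := by
  rw [PySem.Str.toList_join]
  exact pv_join_empty _

theorem pv_strTimes_toList (s : String) (n : Int) :
    (pvStrTimes s n).toList = (List.replicate n.toNat s.toList).flatten := by
  rw [pvStrTimes, pv_join_toList, List.map_replicate]

-- row = 0 or row = size-1: every cell is the symbol, a solid run
theorem pv_row_solid (symbol : String) (size row : Int)
    (hcase : row = 0 ∨ row = size - 1) :
    PySem.Str.join "" ((PySem.List.pyRange row size 1).foldl (fun line col =>
        line ++ [if row = 0 ∨ row = size - 1 ∨ col = row ∨ col = size - 1 then symbol else " "]) [])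
      = pvStrTimes symbol (size - row) := by
  rw [pv_foldl_app, List.nil_append]
  have hmap : (PySem.List.pyRange row size 1).map (fun col =>
      if row = 0 ∨ row = size - 1 ∨ col = row ∨ col = size - 1 then symbol else " ")
      = List.replicate (size - row).toNat symbol := by
    rw [List.eq_replicate_iff]
    constructor
    · simp [PySem.List.length_pyRange_one]
    · intro b hb
      simp only [List.mem_map] at hb
      obtain ⟨col, _, hcol⟩ := hb
      rw [if_pos (by tauto)] at hcol
      exact hcol.symm
  rw [hmap]
  apply String.ext
  rw [pv_join_toList, pv_strTimes_toList, List.map_replicate]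

-- a middle row: symbol, spaces, symbol
theorem pv_row_hollow (symbol : String) (size row : Int)
    (h0 : 0 < row) (h1 : row < size - 1) :
    PySem.Str.join "" ((PySem.List.pyRange row size 1).foldl (fun line col =>
        line ++ [if row = 0 ∨ row = size - 1 ∨ col = row ∨ col = size - 1 then symbol else " "]) [])
      = symbol ++ pvStrTimes " " (size - row - 2) ++ symbol := by
  rw [pv_foldl_app, List.nil_append]
  have hsplit : PySem.List.pyRange row size 1
      = row :: (PySem.List.pyRange (row + 1) (size - 1) 1 ++ [size - 1]) := by
    rw [PySem.List.pyRange_one_cons (by omega)]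
    rw [PySem.List.pyRange_one_append (row + 1) (size - 1) size (by omega) (by omega)]
    rw [show PySem.List.pyRange (size - 1) size 1 = PySem.List.pyRange (size - 1) ((size - 1) + 1) 1 by ring_nf]
    rw [PySem.List.pyRange_one_singleton]
  rw [hsplit]
  have hmid : (PySem.List.pyRange (row + 1) (size - 1) 1).map (fun col =>
      if row = 0 ∨ row = size - 1 ∨ col = row ∨ col = size - 1 then symbol else " ")
      = List.replicate (size - row - 2).toNat " " := by
    rw [List.eq_replicate_iff]
    constructor
    · simp [PySem.List.length_pyRange_one]; omega
    · intro b hb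
      simp only [List.mem_map] at hb
      obtain ⟨col, hcolmem, hcol⟩ := hb
      rw [PySem.List.mem_pyRange_one] at hcolmem
      rw [if_neg (by omega)] at hcol
      exact hcol.symm
  simp only [List.map_cons, List.map_append, hmid]
  rw [if_pos (by tauto), if_pos (by tauto)]
  apply String.ext
  simp only [pv_join_toList, List.map_cons, List.map_append, List.map_replicate,
    List.flatten_cons, List.flatten_append, String.toList_append, pv_strTimes_toList]
  simp

-- ===== VERDICT (by name: the statement is the Claim_ definition above) =====
theorem right_triangle_reverse_hollow_py_spec : Claim_equal_right_triangle_reverse_hollow_py := by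
  intro symbol size _
  unfold Spec_right_triangle_reverse_hollow_py
  unfold right_triangle_reverse_hollow_py right_triangle_reverse_hollow_py_alt
  rw [pv_foldl_app, pv_foldl_app, List.nil_append, List.nil_append]
  apply List.map_congr_left
  intro row hrow
  rw [PySem.List.mem_pyRange_one] at hrow
  by_cases hcase : row = 0 ∨ row = size - 1
  · rw [pv_row_solid symbol size row hcase, if_pos hcase]
  · rw [not_or] at hcase
    rw [pv_row_hollow symbol size row (by omega) (by omega), if_neg (by tauto)]
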